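-- pv_equiv track=rewrite | github.com/Pancio-code/Fondamenti-informatica-I | laboratorio/esercizi funzioni/Lab07/A_Ex7.py | A_Ex7
-- ===== SOURCE A (Python) =====
-- def A_Ex7(l):
--     s=[]
--     for i in l:
--         for c in i:
--             s.append(c)
--     f=0
--     s1=[]
--     for f in s:
--         if s.count(f)==1:
--             s1.append(f)
--
--     return set(s1)
-- ===== SOURCE B (Python) =====
-- def A_Ex7(l):
--     seen = set()
--     dup = set()
--     for i in l:
--         for c in i:
--             if c in seen:
--                 dup.add(c)
--             else:
--                 seen.add(c)
--     return seen - dup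
-- ===== Notes on version B (the rewrite author's own statement) =====
-- stated objective: faster
-- what changed: Replaces A's flatten-then-rescan (list.count inside a loop over all chars) with a single pass over the characters maintaining 'seen' and 'dup' sets, returning seen - dup.
import Mathlib
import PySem

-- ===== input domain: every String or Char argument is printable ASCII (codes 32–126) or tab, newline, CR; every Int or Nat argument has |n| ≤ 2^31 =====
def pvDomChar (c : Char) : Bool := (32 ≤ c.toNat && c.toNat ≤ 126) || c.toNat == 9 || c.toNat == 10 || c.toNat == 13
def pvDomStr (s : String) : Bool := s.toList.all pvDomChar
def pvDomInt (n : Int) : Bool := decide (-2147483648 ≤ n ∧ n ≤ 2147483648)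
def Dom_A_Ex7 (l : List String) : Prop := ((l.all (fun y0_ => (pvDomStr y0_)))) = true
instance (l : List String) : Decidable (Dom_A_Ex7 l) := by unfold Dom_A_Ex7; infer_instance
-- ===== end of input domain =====

-- B replaces A's flatten-then-rescan (list.count inside a loop over every char) with a
-- single pass maintaining 'seen' and 'dup' sets, returning seen - dup.

-- a one-character Python string (elements of the returned set)
def mk1 (c : Char) : String := String.ofList [c]

-- ===== PORT A =====
def A_Ex7 (l : List String) : List String :=
  let s : List Char := l.foldl (fun s i => i.toList.foldl (fun s c => s ++ [c]) s) []
  let s1 : List Char := s.foldl (fun s1 f => if s.count f == 1 then s1 ++ [f] else s1) []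
  (PySem.Set.ofList s1).map mk1

-- ===== PORT B =====
def A_Ex7_alt (l : List String) : List String :=
  let sd : PySem.Set Char × PySem.Set Char :=
    l.foldl (fun sd i =>
      i.toList.foldl (fun sd c =>
        if PySem.Set.contains sd.1 c then (sd.1, PySem.Set.add sd.2 c)
        else (PySem.Set.add sd.1 c, sd.2)) sd) (PySem.Set.empty, PySem.Set.empty)
  (PySem.Set.diff sd.1 sd.2).map mk1

-- ===== PRECONDITION & SPEC =====
def Spec_A_Ex7 (l : List String) (out : List String) : Prop := out = A_Ex7_alt l
instance (l : List String) (out : List String) : Decidable (Spec_A_Ex7 l out) := by unfold Spec_A_Ex7; infer_instance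

-- ===== CLAIM (what is proved, stated in full; the proofs are below) =====
def Claim_equal_A_Ex7 : Prop := ∀ (l : List String), Dom_A_Ex7 l → Spec_A_Ex7 l (A_Ex7 l)

-- ===== LEMMAS AND PROOFS =====

-- the characters occurring exactly once in cs, in their order of occurrence
def once (cs : List Char) : List Char := cs.filter (fun f => cs.count f == 1)

lemma contains_add (s : PySem.Set Char) (c x : Char) :
    List.contains (PySem.Set.add s c) x = (List.contains s x || decide (x = c)) := by
  by_cases h : PySem.Set.contains s c = true
  · simp only [PySem.Set.add, if_pos h]
    by_cases hx : x = c
    · subst hx; simp_all [PySem.Set.contains]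
    · simp [hx]
  · simp only [PySem.Set.add, if_neg h]
    simp

lemma count_filter_eq (p : Char → Bool) (x : Char) (l : List Char) :
    (l.filter p).count x = if p x then l.count x else 0 := by
  by_cases h : p x = true
  · simp [List.count_filter h, h]
  · simp [h]
    rw [List.count_eq_zero]
    intro hx
    exact h (List.of_mem_filter hx)

lemma nodup_once (cs : List Char) : (once cs).Nodup := by
  refine List.nodup_iff_count.mpr (fun x => ?_)
  unfold once
  rw [count_filter_eq]
  by_cases h : (cs.count x == 1) = true
  · rw [if_pos h]
    exact Nat.le_of_eq (by simpa using h)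
  · simp [h]

-- one-pass loop invariant: the final seen - dup in terms of the remaining characters
lemma core (cs : List Char) (seen dup : List Char) (hsub : ∀ c ∈ dup, c ∈ seen) :
    PySem.Set.diff
      (cs.foldl (fun sd c =>
        if PySem.Set.contains sd.1 c then (sd.1, PySem.Set.add sd.2 c)
        else (PySem.Set.add sd.1 c, sd.2)) (seen, dup)).1
      (cs.foldl (fun sd c =>
        if PySem.Set.contains sd.1 c then (sd.1, PySem.Set.add sd.2 c)
        else (PySem.Set.add sd.1 c, sd.2)) (seen, dup)).2
    = seen.filter (fun x => !dup.contains x && !cs.contains x)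
      ++ (once cs).filter (fun x => !seen.contains x) := by
  induction cs generalizing seen dup with
  | nil =>
    simp [PySem.Set.diff, once]
  | cons c cs ih =>
    simp only [List.foldl_cons]
    by_cases h : PySem.Set.contains seen c = true
    · rw [if_pos h]
      have hc : c ∈ seen := by simpa [PySem.Set.contains] using h
      have hsub' : ∀ x ∈ PySem.Set.add dup c, x ∈ seen := by
        intro x hx
        simp only [PySem.Set.add] at hx
        split at hx
        · exact hsub x hx
        · rcases List.mem_append.mp hx with hx | hx
          · exact hsub x hx
          · simp at hx; subst hx; exact hc
      rw [ih seen (PySem.Set.add dup c) hsub']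
      congr 1
      · refine List.filter_congr (fun x hx => ?_)
        rw [contains_add]
        by_cases hxc : x = c <;> simp [hxc]
      · unfold once
        rw [List.filter_filter, List.filter_filter]
        rw [List.filter_cons_of_neg (by simp [hc])]
        refine List.filter_congr (fun x hx => ?_)
        by_cases hxc : x = c
        · subst hxc; simp [hc]
        · simp [List.count_cons, if_neg (show ¬ c = x from fun he => hxc he.symm)]
    · rw [if_neg h]
      have hc : c ∉ seen := by simpa [PySem.Set.contains] using h
      have hadd : PySem.Set.add seen c = seen ++ [c] := by simp [PySem.Set.add, PySem.Set.contains, hc]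
      rw [hadd, ih (seen ++ [c]) dup (fun x hx => List.mem_append_left _ (hsub x hx))]
      have hcd : c ∉ dup := fun hd => hc (hsub c hd)
      rw [List.filter_append]
      rw [List.append_assoc]
      congr 1
      · refine List.filter_congr (fun x hx => ?_)
        have hxc : x ≠ c := fun he => hc (he ▸ hx)
        simp [hxc]
      · unfold once
        rw [List.filter_filter, List.filter_filter]
        by_cases hcc : c ∈ cs
        · have h1 : ([c].filter (fun x => !dup.contains x && !cs.contains x)) = [] := by
            simp [hcc]
          rw [h1, List.nil_append]
          rw [List.filter_cons_of_neg
            (by simp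
                exact fun _ => Nat.pos_iff_ne_zero.mp (List.count_pos_iff.mpr hcc))]
          refine List.filter_congr (fun x hx => ?_)
          by_cases hxc : x = c
          · subst hxc
            have := List.count_pos_iff.mpr hcc
            simp [hc]
            omega
          · simp [List.count_cons, hxc, if_neg (show ¬ c = x from fun he => hxc he.symm)]
        · have h1 : ([c].filter (fun x => !dup.contains x && !cs.contains x)) = [c] := by
            simp [hcc, hcd]
          rw [h1]
          rw [List.filter_cons_of_pos (by simp [List.count_eq_zero.mpr hcc, hc])]
          rw [List.singleton_append]
          congr 1
          refine List.filter_congr (fun x hx => ?_)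
          have hxc : x ≠ c := fun he => hcc (he ▸ hx)
          simp [List.count_cons, hxc, if_neg (show ¬ c = x from fun he => hxc he.symm)]

lemma altChar (l : List String) :
    A_Ex7_alt l = (once (l.flatMap String.toList)).map mk1 := by
  show (PySem.Set.diff
      (l.foldl (fun sd i =>
        i.toList.foldl (fun sd c =>
          if PySem.Set.contains sd.1 c then (sd.1, PySem.Set.add sd.2 c)
          else (PySem.Set.add sd.1 c, sd.2)) sd) (PySem.Set.empty, PySem.Set.empty)).1
      (l.foldl (fun sd i =>
        i.toList.foldl (fun sd c =>
          if PySem.Set.contains sd.1 c then (sd.1, PySem.Set.add sd.2 c)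
          else (PySem.Set.add sd.1 c, sd.2)) sd) (PySem.Set.empty, PySem.Set.empty)).2).map mk1 = _
  rw [← List.foldl_flatMap, core _ _ _ (by simp [PySem.Set.empty])]
  simp [PySem.Set.empty]

lemma aChar (l : List String) :
    A_Ex7 l = (once (l.flatMap String.toList)).map mk1 := by
  show (PySem.Set.ofList
    ((l.foldl (fun s i => i.toList.foldl (fun s c => s ++ [c]) s) []).foldl
      (fun s1 f => if (l.foldl (fun s i => i.toList.foldl (fun s c => s ++ [c]) s) []).count f == 1
        then s1 ++ [f] else s1) [])).map mk1 = _
  have hcongr : l.foldl (fun s i => i.toList.foldl (fun s c => s ++ [c]) s) ([] : List Char)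
      = l.foldl (fun s i => s ++ i.toList) [] :=
    PySem.List.foldl_congr_mem l _ _ [] (fun acc x _ => PySem.List.foldl_append_singleton_eq_self _ _)
  have hs : l.foldl (fun s i => i.toList.foldl (fun s c => s ++ [c]) s) []
      = l.flatMap String.toList := by
    rw [hcongr, PySem.List.foldl_append_eq_flatMap]; simp
  rw [hs, PySem.List.foldl_append_if_eq_filter]
  rw [List.nil_append]
  rw [show List.filter (fun f => List.count f (l.flatMap String.toList) == 1)
        (l.flatMap String.toList) = once (l.flatMap String.toList) from rfl]
  rw [PySem.Set.ofList_eq_self_of_nodup _ (nodup_once _)]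

-- ===== VERDICT (by name: the statement is the Claim_ definition above) =====
theorem A_Ex7_spec : Claim_equal_A_Ex7 := by
  intro l _
  show A_Ex7 l = A_Ex7_alt l
  rw [aChar, altChar]
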